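-- pv_equiv track=rewrite | github.com/RENHANFEI/LintCode | LintCode/858.py | delCandy
-- ===== SOURCE A (Python) =====
-- def delCandy(board):
--
--     crushes = []
--
--     if len(board[0]) >= 3:
--         for i, row in enumerate(board):
--             pre_candy = row[0]
--             rep = 1
--             for j, candy in enumerate(row[1:]):
--                 if candy != 0 and candy == pre_candy:
--                     rep += 1
--                 else:
--                     if rep >= 3:
--                         for k in range(rep):
--                             crushes.append((i, j - k))
--                     rep = 1
--                 pre_candy = candy
--             if rep >= 3:
--                 for k in range(rep):
--                     crushes.append((i, j + 1 - k))
--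
--     for j in range(len(board[0])):
--         pre_candy = board[0][j]
--         rep = 1
--         for i in range(len(board) - 1):
--             candy = board[i + 1][j]
--             if candy != 0 and candy == pre_candy:
--                 rep += 1
--             else:
--                 if rep >= 3:
--                     for k in range(rep):
--                         crushes.append((i - k, j))
--                 rep = 1
--             pre_candy = candy
--         if rep >= 3:
--             for k in range(rep):
--                 crushes.append((i - k + 1, j))
--     for crush in crushes:
--         board[crush[0]][crush[1]] = 0
--
--     return crushes != []
-- ===== SOURCE B (Python) =====
-- def delCandy(board):
--     nrows, ncols = len(board), len(board[0])
--     marked = set()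
--     if ncols >= 3:
--         for i, row in enumerate(board):
--             for j in range(len(row) - 2):
--                 v = row[j]
--                 if v != 0 and row[j + 1] == v and row[j + 2] == v:
--                     marked.update(((i, j), (i, j + 1), (i, j + 2)))
--     for j in range(ncols):
--         for i in range(nrows - 2):
--             v = board[i][j]
--             if v != 0 and board[i + 1][j] == v and board[i + 2][j] == v:
--                 marked.update(((i, j), (i + 1, j), (i + 2, j)))
--     for i, j in marked:
--         board[i][j] = 0
--     return len(marked) > 0
-- ===== Notes on version B (the rewrite author's own statement) =====
-- stated objective: idiomatic
-- what changed: Replaces A's run-length-encoding scan that accumulates a list of crush coordinates (with leaked loop indices for the tail run) by the standard window-of-3 detection into a marked set followed by one clearing pass.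
import Mathlib
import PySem

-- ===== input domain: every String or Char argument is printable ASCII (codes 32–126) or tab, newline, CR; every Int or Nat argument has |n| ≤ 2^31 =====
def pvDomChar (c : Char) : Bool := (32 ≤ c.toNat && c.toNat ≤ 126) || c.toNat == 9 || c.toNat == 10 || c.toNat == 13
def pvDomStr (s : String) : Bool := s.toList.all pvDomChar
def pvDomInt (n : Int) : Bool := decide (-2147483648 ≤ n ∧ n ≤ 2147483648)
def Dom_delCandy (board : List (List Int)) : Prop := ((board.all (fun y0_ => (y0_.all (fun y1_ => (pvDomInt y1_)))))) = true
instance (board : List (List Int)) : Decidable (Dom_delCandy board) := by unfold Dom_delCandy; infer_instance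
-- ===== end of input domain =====

-- B replaces A's run-length scan that accumulates a crush-coordinate list by window-of-3
-- detection into a marked set (idiomatic Candy-Crush style); equal return value is proved.
-- Both Pythons mutate `board` in place (they zero the same cells); the theorems here are
-- about the RETURN value only.

-- ===== PORT A =====
-- A's inner RLE loop body ('for j, candy in enumerate(row[1:])' / 'for i in range(len(board)-1)'):
-- state (crush-positions-so-far, pre_candy, rep); p = (index, candy).
def scanStep (st : List Int × Int × Int) (p : Int × Int) : List Int × Int × Int :=
  if p.2 ≠ 0 ∧ p.2 = st.2.1 then (st.1, p.2, st.2.2 + 1)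
  else ((if st.2.2 ≥ 3 then st.1 ++ (PySem.List.pyRange 0 st.2.2 1).map (fun k => p.1 - k) else st.1),
        p.2, 1)

-- One line (a row, or a column read as board[0][j], board[1][j], …): A's scan
-- 'pre_candy = vals[0]; rep = 1; loop; tail check'.  The tail emission uses Python's leaked
-- loop index, which whenever the tail fires (rep ≥ 3 forces ≥ 3 elements, so the loop ran)
-- equals vals.length - 2; the emitted positions are (vals.length - 1) - k, k < rep.
def scanLine (vals : List Int) : List Int :=
  match vals with
  | [] => []
  | v0 :: rest =>
    let st := (PySem.List.enumerate rest).foldl scanStep ([], v0, 1)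
    if st.2.2 ≥ 3 then st.1 ++ (PySem.List.pyRange 0 st.2.2 1).map (fun k => (rest.length : Int) - k)
    else st.1

def delCandy (board : List (List Int)) : Bool :=
  let w0 := (board.headD []).length      -- len(board[0]); board ≠ [] is in Pre_
  let hCr : List (Int × Int) :=
    if w0 ≥ 3 then
      (PySem.List.enumerate board).foldl
        (fun acc p => acc ++ (scanLine p.2).map (fun q => (p.1, q))) []
    else []
  let crushes : List (Int × Int) :=
    (PySem.List.pyRange 0 (w0 : Int) 1).foldl
      (fun acc j =>
        acc ++ (scanLine (board.map (fun row => PySem.List.pyGetD row j 0))).map (fun q => (q, j)))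
      hCr
  -- the in-place zeroing of board at the crush positions is a side effect, not the return value
  !crushes.isEmpty

-- ===== PORT B =====
-- horizontal window test at column j of a row (row[j] != 0 == row[j+1] == row[j+2]);
-- getD is exact here: B only evaluates it at j with j+2 < len(row).
def hHit (row : List Int) (j : Nat) : Bool :=
  decide (row.getD j 0 ≠ 0 ∧ row.getD (j+1) 0 = row.getD j 0 ∧ row.getD (j+2) 0 = row.getD j 0)

-- vertical window test at row i of column j (board[i][j] != 0 == board[i+1][j] == board[i+2][j])
def vHit (board : List (List Int)) (j i : Nat) : Bool :=
  decide ((board.getD i []).getD j 0 ≠ 0 ∧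
          (board.getD (i+1) []).getD j 0 = (board.getD i []).getD j 0 ∧
          (board.getD (i+2) []).getD j 0 = (board.getD i []).getD j 0)

def delCandy_alt (board : List (List Int)) : Bool :=
  let nrows := board.length
  let ncols := (board.headD []).length   -- len(board[0]); board ≠ [] is in Pre_
  let m1 : PySem.Set (Int × Int) :=
    if ncols ≥ 3 then
      (PySem.List.enumerate board).foldl
        (fun m p =>
          (List.range (p.2.length - 2)).foldl
            (fun m j =>
              if hHit p.2 j then
                PySem.Set.add (PySem.Set.add (PySem.Set.add m (p.1, (j : Int)))
                  (p.1, (j : Int) + 1)) (p.1, (j : Int) + 2)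
              else m) m)
        PySem.Set.empty
    else PySem.Set.empty
  let m2 : PySem.Set (Int × Int) :=
    (List.range ncols).foldl
      (fun m j =>
        (List.range (nrows - 2)).foldl
          (fun m i =>
            if vHit board j i then
              PySem.Set.add (PySem.Set.add (PySem.Set.add m ((i : Int), (j : Int)))
                ((i : Int) + 1, (j : Int))) ((i : Int) + 2, (j : Int))
            else m) m)
      m1
  -- the in-place zeroing of the marked cells is a side effect, not the return value
  decide (0 < PySem.Set.len m2)

-- ===== PRECONDITION & SPEC =====
-- Exactly where the Python A returns: board nonempty, and no row shorter than row 0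
-- (otherwise board[0], row[0] or board[i][j] raises IndexError).
def Pre_delCandy (board : List (List Int)) : Prop :=
  board ≠ [] ∧ ∀ row ∈ board, (board.headD []).length ≤ row.length
instance (board : List (List Int)) : Decidable (Pre_delCandy board) := by
  unfold Pre_delCandy; infer_instance

def pvWitness_delCandy : List (List Int) := [[1, 1, 1], [2, 0, 2], [1, 2, 1]]

def Spec_delCandy (board : List (List Int)) (out : Bool) : Prop := out = delCandy_alt board
instance (board : List (List Int)) (out : Bool) : Decidable (Spec_delCandy board out) := by
  unfold Spec_delCandy; infer_instance

-- ===== CLAIM (what is proved, stated in full; the proofs are below) =====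
def Claim_equal_delCandy : Prop := ∀ (board : List (List Int)),
  Dom_delCandy board → Pre_delCandy board → Spec_delCandy board (delCandy board)

-- ===== LEMMAS AND PROOFS =====

-- 'some 3-window of equal nonzero values exists in this line', head-recursively
def hasWin : List Int → Bool
  | a :: b :: c :: t => (decide (a ≠ 0) && decide (b = a) && decide (c = a)) || hasWin (b :: c :: t)
  | _ => false

-- abstract boolean shadow of A's RLE scan: 'does the scan (plus tail check) emit anything?'
def bscan (pre rep : Int) : List Int → Bool
  | [] => decide (3 ≤ rep)
  | c :: cs => if c ≠ 0 ∧ c = pre then bscan c (rep + 1) cs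
               else (decide (3 ≤ rep) || bscan c 1 cs)

-- length of the leading block of elements equal to pre and nonzero
def leadRun (pre : Int) : List Int → Nat
  | [] => 0
  | c :: cs => if c ≠ 0 ∧ c = pre then leadRun pre cs + 1 else 0

lemma leadRun_pos_ne_zero (pre : Int) (cs : List Int) (h : 1 ≤ leadRun pre cs) : pre ≠ 0 := by
  cases cs with
  | nil => simp [leadRun] at h
  | cons c cs =>
    by_cases hc : c ≠ 0 ∧ c = pre
    · exact hc.2 ▸ hc.1
    · simp only [leadRun] at h; rw [if_neg hc] at h; omega

lemma hasWin_cons (c : Int) (cs : List Int) :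
    hasWin (c :: cs) = true ↔ ((c ≠ 0 ∧ 2 ≤ leadRun c cs) ∨ hasWin cs = true) := by
  match cs with
  | [] => simp [hasWin, leadRun]
  | [b] =>
    simp only [hasWin, leadRun, Bool.false_eq_true, or_false, false_iff, not_and, not_le]
    intro _
    split_ifs <;> omega
  | b :: d :: t =>
    have hlr : (2 ≤ leadRun c (b :: d :: t)) ↔ ((b ≠ 0 ∧ b = c) ∧ (d ≠ 0 ∧ d = c)) := by
      simp only [leadRun]
      split_ifs with h1 h2 <;> simp_all
      omega
    simp only [hasWin, Bool.or_eq_true, Bool.and_eq_true, decide_eq_true_eq, hlr]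
    constructor
    · rintro (⟨⟨hc0, hb'⟩, hd'⟩ | h)
      · exact Or.inl ⟨hc0, ⟨by omega, hb'⟩, ⟨by omega, hd'⟩⟩
      · exact Or.inr h
    · rintro (⟨hc0, ⟨_, hb'⟩, ⟨_, hd'⟩⟩ | h)
      · exact Or.inl ⟨⟨hc0, hb'⟩, hd'⟩
      · exact Or.inr h

lemma bscan_iff (cs : List Int) : ∀ (pre rep : Int), 0 ≤ rep →
    (bscan pre rep cs = true ↔ (3 ≤ rep + (leadRun pre cs : Int) ∨ hasWin cs = true)) := by
  induction cs with
  | nil => intro pre rep _; simp [bscan, leadRun, hasWin]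
  | cons c cs ih =>
    intro pre rep hrep
    by_cases hc : c ≠ 0 ∧ c = pre
    · have e1 : bscan pre rep (c :: cs) = bscan c (rep + 1) cs := by
        simp only [bscan]; rw [if_pos hc]
      have hlr : leadRun pre (c :: cs) = leadRun pre cs + 1 := by
        simp only [leadRun]; rw [if_pos hc]
      have hpre : leadRun pre cs = leadRun c cs := by rw [hc.2]
      rw [e1, ih c (rep + 1) (by omega), hasWin_cons c cs, hlr, hpre]
      constructor
      · rintro (h | h)
        · left; omega
        · right; right; exact h
      · rintro (h | ⟨hne, hl⟩ | h)
        · left; omega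
        · left; omega
        · right; exact h
    · have e1 : bscan pre rep (c :: cs) = (decide (3 ≤ rep) || bscan c 1 cs) := by
        simp only [bscan]; rw [if_neg hc]
      have hlr : leadRun pre (c :: cs) = 0 := by
        simp only [leadRun]; rw [if_neg hc]
      rw [e1, hlr]
      simp only [Bool.or_eq_true, decide_eq_true_eq, ih c 1 (by omega), hasWin_cons c cs]
      constructor
      · rintro (h | h | h)
        · left; omega
        · right; left
          have h2 : 2 ≤ leadRun c cs := by omega
          exact ⟨leadRun_pos_ne_zero c cs (by omega), h2⟩
        · right; right; exact h
      · rintro (h | ⟨hne, hl⟩ | h)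
        · left; omega
        · right; left; omega
        · right; right; exact h

lemma emit_ne_nil (rep : Int) (f : Int → Int) (h : 3 ≤ rep) :
    ((PySem.List.pyRange 0 rep 1).map f) ≠ [] := by
  apply List.ne_nil_of_length_pos
  simp [PySem.List.length_pyRange_one]
  omega

-- A's inner loop: 'did it (or the tail check) emit anything?' equals bscan
lemma scan_fold_iff (rest : List Int) : ∀ (s : Int) (acc : List Int) (pre rep : Int),
    (((PySem.List.enumerate rest s).foldl scanStep (acc, pre, rep)).1 ≠ [] ∨
      3 ≤ ((PySem.List.enumerate rest s).foldl scanStep (acc, pre, rep)).2.2)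
    ↔ (acc ≠ [] ∨ bscan pre rep rest = true) := by
  induction rest with
  | nil => intro s acc pre rep; simp [PySem.List.enumerate_nil, bscan]
  | cons c cs ih =>
    intro s acc pre rep
    rw [PySem.List.enumerate_cons, List.foldl_cons]
    by_cases hc : c ≠ 0 ∧ c = pre
    · have e : scanStep (acc, pre, rep) (s, c) = (acc, c, rep + 1) := by
        simp only [scanStep]; rw [if_pos hc]
      have eb : bscan pre rep (c :: cs) = bscan c (rep + 1) cs := by
        simp only [bscan]; rw [if_pos hc]
      rw [e, ih, eb]
    · have e : scanStep (acc, pre, rep) (s, c) =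
          ((if rep ≥ 3 then acc ++ (PySem.List.pyRange 0 rep 1).map (fun k => s - k) else acc), c, 1) := by
        simp only [scanStep]; rw [if_neg hc]
      have eb : bscan pre rep (c :: cs) = (decide (3 ≤ rep) || bscan c 1 cs) := by
        simp only [bscan]; rw [if_neg hc]
      rw [e, ih, eb]
      by_cases hrep : 3 ≤ rep
      · rw [if_pos (by omega : rep ≥ 3)]
        simp only [Bool.or_eq_true, decide_eq_true_eq]
        constructor
        · intro; tauto
        · intro; left; intro hnil
          exact emit_ne_nil rep _ hrep (List.append_eq_nil_iff.mp hnil).2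
      · rw [if_neg (by omega : ¬ rep ≥ 3)]
        simp only [Bool.or_eq_true, decide_eq_true_eq]
        tauto

lemma scanLine_ne_nil (vals : List Int) : scanLine vals ≠ [] ↔ hasWin vals = true := by
  match vals with
  | [] => simp [scanLine, hasWin]
  | v0 :: rest =>
    have hfold := scan_fold_iff rest 0 [] v0 1
    simp only [ne_eq, not_true_eq_false, false_or] at hfold
    have hb : bscan v0 1 rest = true ↔ hasWin (v0 :: rest) = true := by
      rw [bscan_iff rest v0 1 (by omega), hasWin_cons v0 rest]
      constructor
      · rintro (h | h)
        · left
          have h2 : 2 ≤ leadRun v0 rest := by omega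
          exact ⟨leadRun_pos_ne_zero v0 rest (by omega), h2⟩
        · right; exact h
      · rintro (⟨hne, hl⟩ | h)
        · left; omega
        · right; exact h
    rw [← hb, ← hfold]
    show (if _ ≥ 3 then _ ++ _ else _) ≠ [] ↔ _
    by_cases h3 : 3 ≤ ((PySem.List.enumerate rest 0).foldl scanStep ([], v0, 1)).2.2
    · rw [if_pos (by omega : ((PySem.List.enumerate rest 0).foldl scanStep ([], v0, 1)).2.2 ≥ 3)]
      constructor
      · intro _; right; exact h3
      · intro _ hnil
        exact emit_ne_nil _ _ h3 (List.append_eq_nil_iff.mp hnil).2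
    · rw [if_neg (by omega : ¬ ((PySem.List.enumerate rest 0).foldl scanStep ([], v0, 1)).2.2 ≥ 3)]
      constructor
      · intro h; exact Or.inl h
      · rintro (h | h)
        · exact h
        · exact absurd h h3

-- generic emptiness of an accumulate-only foldl
lemma foldl_ne_nil_iff {α γ : Type} (g : List γ → α → List γ) (C : α → Prop)
    (h1 : ∀ m x, g m x = [] ↔ (m = [] ∧ ¬ C x)) :
    ∀ (L : List α) (m : List γ), (L.foldl g m = [] ↔ (m = [] ∧ ∀ x ∈ L, ¬ C x)) := by
  intro L
  induction L with
  | nil => intro m; simp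
  | cons x L ih =>
    intro m
    rw [List.foldl_cons, ih, h1]
    simp only [List.mem_cons]
    constructor
    · rintro ⟨⟨hm, hx⟩, hall⟩
      refine ⟨hm, ?_⟩
      rintro y (rfl | hy)
      · exact hx
      · exact hall y hy
    · rintro ⟨hm, hall⟩
      exact ⟨⟨hm, hall x (Or.inl rfl)⟩, fun y hy => hall y (Or.inr hy)⟩

lemma set_add_ne_nil {γ : Type} [BEq γ] (s : PySem.Set γ) (x : γ) : PySem.Set.add s x ≠ [] := by
  cases s with
  | nil => simp [PySem.Set.add]
  | cons a t => simp [PySem.Set.add]; split <;> simp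

-- the three-add step of B: empty result iff empty input and no hit
lemma add3_eq_nil_iff {γ : Type} [BEq γ] (m : PySem.Set γ) (b : Bool) (u v w : γ) :
    ((if b = true then PySem.Set.add (PySem.Set.add (PySem.Set.add m u) v) w else m) = []
      ↔ (m = [] ∧ ¬ b = true)) := by
  cases b with
  | false => simp
  | true => simp [set_add_ne_nil]

-- a window position exists in a line iff hasWin
lemma window_iff_hasWin : ∀ (l : List Int),
    (∃ j, j < l.length - 2 ∧ hHit l j = true) ↔ hasWin l = true
  | [] => by simp [hasWin]
  | [a] => by simp [hasWin]
  | [a, b] => by simp [hasWin]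
  | a :: b :: c :: t => by
    have ih := window_iff_hasWin (b :: c :: t)
    have hcons : ∀ (x : Int) (l : List Int) (j : Nat), hHit (x :: l) (j + 1) = hHit l j := by
      intro x l j; simp [hHit]
    constructor
    · rintro ⟨j, hj, hp⟩
      cases j with
      | zero =>
        simp only [hHit, List.getD_cons_zero, List.getD_cons_succ, decide_eq_true_eq] at hp
        simp only [hasWin, Bool.or_eq_true, Bool.and_eq_true, decide_eq_true_eq]
        exact Or.inl ⟨⟨hp.1, hp.2.1⟩, hp.2.2⟩
      | succ j' =>
        simp only [hasWin, Bool.or_eq_true]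
        right
        refine ih.mp ⟨j', ?_, (hcons a (b :: c :: t) j') ▸ hp⟩
        simp only [List.length_cons] at hj ⊢
        omega
    · intro hw
      simp only [hasWin, Bool.or_eq_true, Bool.and_eq_true, decide_eq_true_eq] at hw
      rcases hw with ⟨⟨ha, hb⟩, hc⟩ | hw
      · exact ⟨0, by simp, by simp [hHit, ha, hb, hc]⟩
      · obtain ⟨j', hj', hp⟩ := ih.mpr hw
        refine ⟨j' + 1, ?_, (hcons a (b :: c :: t) j') ▸ hp⟩
        simp only [List.length_cons] at hj' ⊢
        omega

-- B's vertical test is the horizontal test on the materialised column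
lemma colHit (board : List (List Int)) (j i : Nat) :
    hHit (board.map (fun row => PySem.List.pyGetD row (j : Int) 0)) i = vHit board j i := by
  have key : ∀ (k : Nat),
      (board.map (fun row => PySem.List.pyGetD row (j : Int) 0)).getD k 0
        = (board.getD k []).getD j 0 := by
    intro k
    simp only [List.getD, List.getElem?_map]
    cases h : board[k]? with
    | none => simp
    | some row => simp [PySem.List.pyGetD_natCast]
  simp only [hHit, vHit, key]

-- characterisation of A's result
lemma A_char (board : List (List Int)) :
    delCandy board = true ↔
      ((3 ≤ (board.headD []).length ∧ ∃ p ∈ PySem.List.enumerate board, hasWin p.2 = true)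
        ∨ ∃ j : Nat, j < (board.headD []).length ∧
            hasWin (board.map (fun row => PySem.List.pyGetD row (j : Int) 0)) = true) := by
  dsimp only [delCandy]
  rw [show ∀ l : List (Int × Int), ((!l.isEmpty) = true ↔ l ≠ []) from by simp]
  rw [ne_eq]
  rw [foldl_ne_nil_iff
        (fun acc j => acc ++ (scanLine (board.map (fun row => PySem.List.pyGetD row j 0))).map (fun q => (q, j)))
        (fun j => scanLine (board.map (fun row => PySem.List.pyGetD row j 0)) ≠ [])
        (by intro m x; simp)]
  have hm : ((if (board.headD []).length ≥ 3 then
        (PySem.List.enumerate board).foldl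
          (fun acc p => acc ++ (scanLine p.2).map (fun q => (p.1, q))) []
      else []) = []) ↔
      ¬ (3 ≤ (board.headD []).length ∧ ∃ p ∈ PySem.List.enumerate board, hasWin p.2 = true) := by
    split_ifs with h3
    · rw [foldl_ne_nil_iff
          (fun (acc : List (Int × Int)) (p : Int × List Int) =>
            acc ++ (scanLine p.2).map (fun q => (p.1, q)))
          (fun (p : Int × List Int) => scanLine p.2 ≠ [])
          (by intro m x; simp)]
      constructor
      · rintro ⟨-, hall⟩ ⟨-, p, hp, hw⟩
        exact hall p hp ((scanLine_ne_nil p.2).mpr hw)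
      · intro h
        exact ⟨rfl, fun p hp hne => h ⟨h3, p, hp, (scanLine_ne_nil p.2).mp hne⟩⟩
    · constructor
      · rintro - ⟨h, -⟩; exact h3 h
      · intro _; rfl
  rw [hm]
  have hVb : (∃ j ∈ PySem.List.pyRange 0 (((board.headD []).length : Nat) : Int) 1,
        scanLine (board.map (fun row => PySem.List.pyGetD row j 0)) ≠ []) ↔
      (∃ j : Nat, j < (board.headD []).length ∧
        hasWin (board.map (fun row => PySem.List.pyGetD row (j : Int) 0)) = true) := by
    constructor
    · rintro ⟨j, hj, hc⟩
      rcases PySem.List.mem_pyRange_one.mp hj with ⟨h0, h1⟩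
      refine ⟨j.toNat, by omega, ?_⟩
      rw [Int.toNat_of_nonneg h0]
      exact (scanLine_ne_nil _).mp hc
    · rintro ⟨n, hn, hw⟩
      exact ⟨(n : Int),
        PySem.List.mem_pyRange_one.mpr ⟨by omega, by exact_mod_cast hn⟩,
        (scanLine_ne_nil _).mpr hw⟩
  constructor
  · intro hne
    by_cases hH : 3 ≤ (board.headD []).length ∧ ∃ p ∈ PySem.List.enumerate board, hasWin p.2 = true
    · exact Or.inl hH
    · right
      rw [← hVb]
      by_contra hno
      exact hne ⟨hH, fun j hj hc => hno ⟨j, hj, hc⟩⟩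
  · rintro (hH | hV) ⟨hH', hall⟩
    · exact hH' hH
    · obtain ⟨j, hj, hc⟩ := hVb.mpr hV
      exact hall j hj hc

-- characterisation of B's result
lemma B_char (board : List (List Int)) :
    delCandy_alt board = true ↔
      ((3 ≤ (board.headD []).length ∧
          ∃ p ∈ PySem.List.enumerate board, ∃ j, j < p.2.length - 2 ∧ hHit p.2 j = true)
        ∨ ∃ j : Nat, j < (board.headD []).length ∧
            ∃ i, i < board.length - 2 ∧ vHit board j i = true) := by
  dsimp only [delCandy_alt]
  rw [show ∀ s : PySem.Set (Int × Int), ((decide (0 < PySem.Set.len s)) = true ↔ s ≠ []) from by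
    intro s; simp [PySem.Set.len, List.length_pos_iff]]
  rw [ne_eq]
  rw [foldl_ne_nil_iff
        (fun m j =>
          (List.range (board.length - 2)).foldl
            (fun m i =>
              if vHit board j i then
                PySem.Set.add (PySem.Set.add (PySem.Set.add m ((i : Int), (j : Int)))
                  ((i : Int) + 1, (j : Int))) ((i : Int) + 2, (j : Int))
              else m) m)
        (fun j => ∃ i ∈ List.range (board.length - 2), vHit board j i = true)
        (by
          intro m j
          rw [foldl_ne_nil_iff
                (fun m i =>
                  if vHit board j i then
                    PySem.Set.add (PySem.Set.add (PySem.Set.add m ((i : Int), (j : Int)))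
                      ((i : Int) + 1, (j : Int))) ((i : Int) + 2, (j : Int))
                  else m)
                (fun i => vHit board j i = true)
                (by intro m i; exact add3_eq_nil_iff m (vHit board j i) _ _ _)]
          constructor
          · rintro ⟨hm, hall⟩
            exact ⟨hm, fun hex => by obtain ⟨i, hi, hv⟩ := hex; exact hall i hi hv⟩
          · rintro ⟨hm, hno⟩
            exact ⟨hm, fun i hi hv => hno ⟨i, hi, hv⟩⟩)]
  have hm1 : ((if (board.headD []).length ≥ 3 then
        (PySem.List.enumerate board).foldl
          (fun m p =>
            (List.range (p.2.length - 2)).foldl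
              (fun m j =>
                if hHit p.2 j then
                  PySem.Set.add (PySem.Set.add (PySem.Set.add m (p.1, (j : Int)))
                    (p.1, (j : Int) + 1)) (p.1, (j : Int) + 2)
                else m) m)
          PySem.Set.empty
      else PySem.Set.empty) = []) ↔
      ¬ (3 ≤ (board.headD []).length ∧
          ∃ p ∈ PySem.List.enumerate board, ∃ j, j < p.2.length - 2 ∧ hHit p.2 j = true) := by
    split_ifs with h3
    · rw [foldl_ne_nil_iff
          (fun (m : PySem.Set (Int × Int)) (p : Int × List Int) =>
            (List.range (p.2.length - 2)).foldl
              (fun m j =>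
                if hHit p.2 j then
                  PySem.Set.add (PySem.Set.add (PySem.Set.add m (p.1, (j : Int)))
                    (p.1, (j : Int) + 1)) (p.1, (j : Int) + 2)
                else m) m)
          (fun (p : Int × List Int) => ∃ j ∈ List.range (p.2.length - 2), hHit p.2 j = true)
          (by
            intro m p
            rw [foldl_ne_nil_iff
                  (fun m j =>
                    if hHit p.2 j then
                      PySem.Set.add (PySem.Set.add (PySem.Set.add m (p.1, (j : Int)))
                        (p.1, (j : Int) + 1)) (p.1, (j : Int) + 2)
                    else m)
                  (fun j => hHit p.2 j = true)
                  (by intro m j; exact add3_eq_nil_iff m (hHit p.2 j) _ _ _)]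
            constructor
            · rintro ⟨hm, hall⟩
              exact ⟨hm, fun hex => by obtain ⟨j, hj, hv⟩ := hex; exact hall j hj hv⟩
            · rintro ⟨hm, hno⟩
              exact ⟨hm, fun j hj hv => hno ⟨j, hj, hv⟩⟩)]
      constructor
      · rintro ⟨-, hall⟩ ⟨-, p, hp, j, hj, hv⟩
        exact hall p hp ⟨j, List.mem_range.mpr hj, hv⟩
      · intro h
        refine ⟨rfl, fun p hp hex => ?_⟩
        obtain ⟨j, hj, hv⟩ := hex
        exact h ⟨h3, p, hp, j, List.mem_range.mp hj, hv⟩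
    · constructor
      · rintro - ⟨h, -⟩; exact h3 h
      · intro _; rfl
  rw [hm1]
  constructor
  · intro hne
    by_cases hH : 3 ≤ (board.headD []).length ∧
        ∃ p ∈ PySem.List.enumerate board, ∃ j, j < p.2.length - 2 ∧ hHit p.2 j = true
    · exact Or.inl hH
    · right
      by_contra hno
      refine hne ⟨hH, fun j hj hex => ?_⟩
      obtain ⟨i, hi, hv⟩ := hex
      exact hno ⟨j, List.mem_range.mp hj, i, List.mem_range.mp hi, hv⟩
  · rintro (hH | ⟨j, hj, i, hi, hv⟩) ⟨hH', hall⟩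
    · exact hH' hH
    · exact hall j (List.mem_range.mpr hj) ⟨i, List.mem_range.mpr hi, hv⟩

lemma main_eq (board : List (List Int)) : delCandy board = delCandy_alt board := by
  rw [Bool.eq_iff_iff, A_char, B_char]
  constructor
  · rintro (⟨h3, p, hp, hw⟩ | ⟨j, hj, hw⟩)
    · exact Or.inl ⟨h3, p, hp, (window_iff_hasWin p.2).mpr hw⟩
    · right
      obtain ⟨i, hi, hp⟩ := (window_iff_hasWin _).mpr hw
      rw [colHit board j i] at hp
      rw [List.length_map] at hi
      exact ⟨j, hj, i, hi, hp⟩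
  · rintro (⟨h3, p, hp, j, hj, hw⟩ | ⟨j, hj, i, hi, hw⟩)
    · exact Or.inl ⟨h3, p, hp, (window_iff_hasWin p.2).mp ⟨j, hj, hw⟩⟩
    · right
      refine ⟨j, hj, (window_iff_hasWin _).mp ⟨i, ?_, ?_⟩⟩
      · rw [List.length_map]; exact hi
      · rw [colHit board j i]; exact hw

-- ===== VERDICT (by name: the statement is the Claim_ definition above) =====
theorem delCandy_spec : Claim_equal_delCandy := by
  intro board _ _
  unfold Spec_delCandy
  exact main_eq board
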